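-- pv_equiv track=rewrite | github.com/mqzpt/koalatype | main.py | _filter_by_difficulty
-- ===== SOURCE A (Python) =====
-- def _filter_by_difficulty(
--     words: tuple[str, ...], difficulty: str | None
-- ) -> tuple[str, ...]:
--     if difficulty is None:
--         return words
--     if difficulty == "easy":
--         filtered = tuple(w for w in words if len(w) <= 4)
--     elif difficulty == "medium":
--         filtered = tuple(w for w in words if 4 < len(w) <= 7)
--     elif difficulty == "hard":
--         filtered = tuple(w for w in words if len(w) > 7)
--     else:
--         return words
--     return filtered if filtered else words
-- ===== SOURCE B (Python) =====
-- def _filter_by_difficulty(words, difficulty):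
--     if difficulty not in ("easy", "medium", "hard"):
--         return words
--     buckets = {"easy": [], "medium": [], "hard": []}
--     for w in words:
--         n = len(w)
--         buckets["easy" if n <= 4 else "medium" if n <= 7 else "hard"].append(w)
--     sel = buckets[difficulty]
--     return tuple(sel) if sel else words
-- ===== Notes on version B (the rewrite author's own statement) =====
-- stated objective: alternative
-- what changed: B replaces the chain of per-category predicate filters by a single pass that buckets every word into a three-way table keyed by category and then looks up the requested bucket, keeping the empty-result fallback.
import Mathlib
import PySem

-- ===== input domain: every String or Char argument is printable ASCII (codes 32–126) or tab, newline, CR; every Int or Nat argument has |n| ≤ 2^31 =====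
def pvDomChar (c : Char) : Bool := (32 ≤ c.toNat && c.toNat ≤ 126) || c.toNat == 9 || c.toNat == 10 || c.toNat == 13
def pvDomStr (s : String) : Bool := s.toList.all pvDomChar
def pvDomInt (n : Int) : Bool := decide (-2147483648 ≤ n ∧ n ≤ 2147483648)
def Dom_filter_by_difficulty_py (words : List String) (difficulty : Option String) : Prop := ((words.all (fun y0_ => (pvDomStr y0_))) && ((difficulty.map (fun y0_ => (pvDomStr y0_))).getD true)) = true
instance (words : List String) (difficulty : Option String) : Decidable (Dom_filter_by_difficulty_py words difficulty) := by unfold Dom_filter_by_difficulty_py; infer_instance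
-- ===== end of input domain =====

-- B buckets every word once into a three-way table and looks up the requested category;
-- A filters with a per-category predicate. Equivalence proved on all inputs (objective: alternative).

-- ===== PORT A =====
def filter_by_difficulty_py (words : List String) (difficulty : Option String) : List String :=
  match difficulty with
  | none => words
  | some d =>
    if d = "easy" then
      let filtered := words.filter (fun w => decide (PySem.Str.len w ≤ 4))
      if filtered = [] then words else filtered
    else if d = "medium" then
      let filtered := words.filter (fun w => decide (4 < PySem.Str.len w ∧ PySem.Str.len w ≤ 7))
      if filtered = [] then words else filtered
    else if d = "hard" then
      let filtered := words.filter (fun w => decide (7 < PySem.Str.len w))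
      if filtered = [] then words else filtered
    else words

-- ===== PORT B =====
-- the dict {"easy": …, "medium": …, "hard": …} of Source B, as a fixed triple of buckets
def pvBuckets (words : List String) : List String × List String × List String :=
  words.foldl
    (fun acc w =>
      let n := PySem.Str.len w
      if n ≤ 4 then (acc.1 ++ [w], acc.2.1, acc.2.2)
      else if n ≤ 7 then (acc.1, acc.2.1 ++ [w], acc.2.2)
      else (acc.1, acc.2.1, acc.2.2 ++ [w]))
    ([], [], [])

def filter_by_difficulty_py_alt (words : List String) (difficulty : Option String) : List String :=
  match difficulty with
  | none => words
  | some d =>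
    if d = "easy" ∨ d = "medium" ∨ d = "hard" then
      let b := pvBuckets words
      let sel := if d = "easy" then b.1 else if d = "medium" then b.2.1 else b.2.2
      if sel = [] then words else sel
    else words

-- ===== PRECONDITION & SPEC =====
def Spec_filter_by_difficulty_py (words : List String) (difficulty : Option String) (out : List String) : Prop := out = filter_by_difficulty_py_alt words difficulty
instance (words : List String) (difficulty : Option String) (out : List String) : Decidable (Spec_filter_by_difficulty_py words difficulty out) := by unfold Spec_filter_by_difficulty_py; infer_instance

-- ===== CLAIM =====
def Claim_equal_filter_by_difficulty_py : Prop := ∀ (words : List String) (difficulty : Option String), Dom_filter_by_difficulty_py words difficulty → Spec_filter_by_difficulty_py words difficulty (filter_by_difficulty_py words difficulty)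

-- ===== LEMMAS AND PROOFS =====
theorem pvBuckets_go (words : List String) (e m h : List String) :
    words.foldl
      (fun acc w =>
        let n := PySem.Str.len w
        if n ≤ 4 then (acc.1 ++ [w], acc.2.1, acc.2.2)
        else if n ≤ 7 then (acc.1, acc.2.1 ++ [w], acc.2.2)
        else (acc.1, acc.2.1, acc.2.2 ++ [w]))
      (e, m, h)
    = (e ++ words.filter (fun w => decide (PySem.Str.len w ≤ 4)),
       m ++ words.filter (fun w => decide (4 < PySem.Str.len w ∧ PySem.Str.len w ≤ 7)),
       h ++ words.filter (fun w => decide (7 < PySem.Str.len w))) := by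
  induction words generalizing e m h with
  | nil => simp
  | cons w ws ih =>
    simp only [List.foldl_cons, List.filter_cons]
    simp [PySem.Str.len] at ih
    by_cases h1 : w.length ≤ 4
    · simp [PySem.Str.len, h1, ih, show ¬ (4 < w.length) by omega,
        show ¬ (7 < w.length) by omega]
    · by_cases h2 : w.length ≤ 7
      · simp [PySem.Str.len, h1, h2, ih, show 4 < w.length by omega,
          show ¬ (7 < w.length) by omega]
      · simp [PySem.Str.len, h1, h2, ih, show 7 < w.length by omega,
          show 4 < w.length by omega]

theorem pvBuckets_eq (words : List String) :
    pvBuckets words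
    = (words.filter (fun w => decide (PySem.Str.len w ≤ 4)),
       words.filter (fun w => decide (4 < PySem.Str.len w ∧ PySem.Str.len w ≤ 7)),
       words.filter (fun w => decide (7 < PySem.Str.len w))) := by
  simpa [pvBuckets] using pvBuckets_go words [] [] []

-- ===== VERDICT =====
theorem filter_by_difficulty_py_spec : Claim_equal_filter_by_difficulty_py := by
  intro words difficulty _
  unfold Spec_filter_by_difficulty_py filter_by_difficulty_py filter_by_difficulty_py_alt
  match difficulty with
  | none => rfl
  | some d =>
    by_cases he : d = "easy"
    · simp [he, pvBuckets_eq]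
    · by_cases hm : d = "medium"
      · simp [hm, pvBuckets_eq]
      · by_cases hh : d = "hard"
        · simp [hh, pvBuckets_eq]
        · simp [he, hm, hh]
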